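-- pv_equiv track=rewrite | github.com/MrPickle200/ChessEngine | scrap.py | convert_idx_to_pos
-- ===== SOURCE A (Python) =====
-- def convert_idx_to_pos(idx:int) -> str:
--     table = {
--         "a1":0,
--         "b1":1,
--         "c1":2,
--         "d1":3,
--         "e1":4,
--         "f1":5,
--         "g1":6,
--         "h1":7
--              }
--     for i in range(2,9):
--         for char in ['a','b','c','d','e','f','g','h']:
--             table[char + str(i)] = table[char + str(i - 1)] + 8
--     for key, value in table.items():
--         if idx == value:
--             return key
-- ===== SOURCE B (Python) =====
-- def convert_idx_to_pos(idx: int) -> str: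
--     if 0 <= idx < 64:
--         return chr(ord('a') + idx % 8) + str(idx // 8 + 1)
-- ===== Notes on version B (the rewrite author's own statement) =====
-- stated objective: simpler
-- what changed: Replaced building a 64-entry dict via nested loops and linearly scanning it with a direct arithmetic closed form computing the file letter and rank from the index by modulus and floor division.
-- outside the precondition, e.g. on convert_idx_to_pos(64): A returns None, B returns None; on convert_idx_to_pos(-1): A returns None, B returns None
import Mathlib
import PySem

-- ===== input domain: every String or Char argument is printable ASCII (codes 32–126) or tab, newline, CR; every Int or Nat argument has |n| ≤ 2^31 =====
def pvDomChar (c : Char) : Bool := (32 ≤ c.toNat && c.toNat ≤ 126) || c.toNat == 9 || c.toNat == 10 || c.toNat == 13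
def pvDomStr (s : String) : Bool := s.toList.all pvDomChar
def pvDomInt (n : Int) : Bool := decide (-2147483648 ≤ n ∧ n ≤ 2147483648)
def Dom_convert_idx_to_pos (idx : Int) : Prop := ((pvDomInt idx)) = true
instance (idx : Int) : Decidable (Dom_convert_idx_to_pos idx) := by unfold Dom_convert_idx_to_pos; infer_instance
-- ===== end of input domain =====

-- B computes the coordinate by a closed arithmetic form instead of A's dict build + linear scan (objective: simpler).


-- ===== PORT A =====
-- Literal transliteration of A: build the 64-entry table (initial rank-1 literals, then
-- the two nested loops), then scan table.items() returning the first key whose value is idx.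
-- Python returns None when no entry matches (idx outside 0..63); that is outside Pre_ below,
-- and the missing return is represented by the Option's .getD "".
def convert_idx_to_pos (idx : Int) : String :=
  let table : PySem.Dict String Int :=
    PySem.Dict.ofList [("a1",0),("b1",1),("c1",2),("d1",3),("e1",4),("f1",5),("g1",6),("h1",7)]
  let table := (PySem.List.pyRange 2 9 1).foldl (fun t i =>
    (["a","b","c","d","e","f","g","h"]).foldl (fun t ch =>
      -- table[char + str(i)] = table[char + str(i-1)] + 8 ; the looked-up key is always
      -- present, so the KeyError case of Python's [] is unreachable (getD's 0 is never used)
      PySem.Dict.insert t (ch ++ PySem.Int.toStr i)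
        (PySem.Dict.getD t (ch ++ PySem.Int.toStr (i - 1)) 0 + 8)) t) table
  (table.items.foldl (fun acc kv =>
      match acc with
      | some k => some k
      | none => if idx == kv.2 then some kv.1 else none) none).getD ""

-- ===== PORT B =====
-- Closed form: chr(ord('a') + idx % 8) + str(idx // 8 + 1) inside the range guard;
-- Python's fall-through None (outside Pre_) is represented by "".
def convert_idx_to_pos_alt (idx : Int) : String :=
  if 0 ≤ idx ∧ idx < 64 then
    String.ofList (Char.ofNat (97 + (PySem.Int.mod idx 8).toNat) :: (PySem.Int.toStr (PySem.Int.floordiv idx 8 + 1)).toList)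
  else ""

-- ===== PRECONDITION & SPEC =====
-- Pre_ excludes idx outside 0..63, where A falls off the loop and returns None — not a str.
def Pre_convert_idx_to_pos (idx : Int) : Prop := 0 ≤ idx ∧ idx < 64
instance (idx : Int) : Decidable (Pre_convert_idx_to_pos idx) := by unfold Pre_convert_idx_to_pos; infer_instance
def pvWitness_convert_idx_to_pos : Int := (27)
def Spec_convert_idx_to_pos (idx : Int) (out : String) : Prop := out = convert_idx_to_pos_alt idx
instance (idx : Int) (out : String) : Decidable (Spec_convert_idx_to_pos idx out) := by unfold Spec_convert_idx_to_pos; infer_instance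

-- ===== CLAIM (what is proved, stated in full; the proofs are below) =====
def Claim_equal_convert_idx_to_pos : Prop := ∀ (idx : Int), Dom_convert_idx_to_pos idx → Pre_convert_idx_to_pos idx → Spec_convert_idx_to_pos idx (convert_idx_to_pos idx)

-- ===== LEMMAS AND PROOFS =====

-- ===== VERDICT (by name: the statement is the Claim_ definition above) =====
set_option maxRecDepth 8000 in
theorem convert_idx_to_pos_spec : Claim_equal_convert_idx_to_pos := by
  unfold Claim_equal_convert_idx_to_pos
  intro idx _ hpre
  unfold Spec_convert_idx_to_pos
  obtain ⟨h0, h1⟩ := hpre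
  interval_cases idx <;> decide
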